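/- GENERATED by mk_final_copies.py from the proof of the farm's unit `vorbis_decode_packet_rest.8` (farm:vorbis_decode_packet_rest.8.2: Lemmas.lean) as the
   re-elaboration sweep compiled it — do not edit. -/
/-
  PURE LEMMAS OF THE UNIT vorbis_decode_packet_rest.8 (no walk): the objects of the protected frame, where the mapping record and
  its `chan` block are, the check sites of the coupling-flags loop, and how the assertion `At9` of the exit follows from the
  entry assertion `At8` when only the function's own stack area was written.
-/
import Asan.CheckWalk
import Vorbis.Spec.PacketRestFrame
import Vorbis.Spec.Units.vorbis_decode_packet_rest_8

open X86 X86.User Asan Vorbis Vorbis.Spec Vorbis.Spec.vorbis_decode_packet_rest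

set_option maxRecDepth 100000
set_option maxHeartbeats 4000000

namespace Vorbis.Spec.vorbis_decode_packet_rest_8

variable {u₀ : State} {others : List Obj} {frames : List (Nat × FrameLayout)} {len : Nat} {Ar : Arena}
  {stored room : Int} {mode : Nat} {ysz : Nat → Nat} {e : State} {ret : Word} {v : State}

/-- The frame object `zero_channel[256]` (1024 bytes at `entry rsp − 2360` = steady `rsp + 0x280`) is a live object inside the
function. -/
theorem zc_obj (others : List Obj) (frames : List (Nat × FrameLayout)) (e : State) :
    (⟨(e.reg .rsp).toNat - 2872 + 512, 1024, .stack⟩ : Obj) ∈ stackObjs (framesIn frames e) ++ others := by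
  unfold framesIn
  rw [stackObjs_cons]
  apply List.mem_append_left
  apply List.mem_append_left
  unfold FrameLayout.objsAt Vorbis.Frames.vorbis_decode_packet_rest
  simp only [List.map_cons, List.mem_cons, true_or, or_true]

/-- The frame object `really_zero_channel[256]` (1024 bytes at `entry rsp − 1208` = steady `rsp + 0x700`). -/
theorem rzc_obj (others : List Obj) (frames : List (Nat × FrameLayout)) (e : State) :
    (⟨(e.reg .rsp).toNat - 2872 + 1664, 1024, .stack⟩ : Obj) ∈ stackObjs (framesIn frames e) ++ others := by
  unfold framesIn
  rw [stackObjs_cons]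
  apply List.mem_append_left
  apply List.mem_append_left
  unfold FrameLayout.objsAt Vorbis.Frames.vorbis_decode_packet_rest
  simp only [List.map_cons, List.mem_cons, true_or, or_true]

/-- A spill slot's address: `steady rsp + 0x60` as the walker normalises it. -/
theorem slot_60 (x : Word) : x - 3000 + 0x60 = x - 2904 := by
  bv_decide

/-- The byte count of the `memcpy` (0x111461: `cdqe ; lea rdx, [rax*4]`) for a channel count `C ≤ 16`. -/
theorem rdx_val (C : Nat) (hC : C ≤ 16) :
    (Word.ofBV (BitVec.signExtend 64 (Word.part .w32 (UInt64.ofNat C))) * 4).toNat = 4 * C := by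
  have h1 : (Word.part .w32 (UInt64.ofNat C)).toNat = C := by
    rw [Vorbis.toNat_part32, UInt64.toNat_ofNat']
    omega
  have h2 := toNat_sext32 (Word.part .w32 (UInt64.ofNat C)) (by omega)
  have e4 : (4 : Word).toNat = 4 := rfl
  rw [UInt64.toNat_mul, h2, h1, e4]
  omega

/-- **The mode number is a mode of the CURRENT memory**: `mode_count` is not in a decode-time hole of `*f`, and the function's
footprint so far (`Frame.same`) is made of decode-time stores (`footprint_storeOK`). -/
theorem mode_lt_now (h : Frame u₀ others frames len Ar stored room mode ysz e ret v)
    (hroom : 0x700000 + 3856 ≤ (e.reg .rsp).toNat) :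
    (mode : Int) < stb_vorbis.mode_count v.mem (fOf e) := by
  have hpre := h.pre
  obtain ⟨hsh, hinv, hargs⟩ := hpre
  have hd : DecodeSame (fOf e) e.mem v.mem :=
    StoreOK.decodeSame hinv.ok hinv.ob1 hinv.sep h.same (fun s hs => footprint_storeOK h.pre hroom s hs)
  have e1 := hd.i32 480 (by decide)
  have hm := hargs.mode_lt
  simp only [vacc, voff] at hm ⊢
  rw [e1]
  exact hm

/-- **MP2 – MP6 of the mapping record `map = &f->mapping[m->mapping]`** in the current memory. -/
theorem map_ok (h : Frame u₀ others frames len Ar stored room mode ysz e ret v)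
    (hroom : 0x700000 + 3856 ≤ (e.reg .rsp).toNat) :
    MappingAtOK (RunBlk Ar len) v.mem (fOf e) (mapOf v.mem (fOf e) (mOf e)) := by
  have hv := h.inv.fb.vorbis
  have hm := mode_lt_now h hroom
  have hargs := h.pre.2.2
  unfold mapOf
  rw [hargs.m_eq]
  exact hv.mapping.of_mode hv.mode hm

/-- **Where the mapping record is**: its 56 bytes lie in the data space and off the stack region (it is part of the allocated
block of MP1). -/
theorem map_where (h : Frame u₀ others frames len Ar stored room mode ysz e ret v)
    (hroom : 0x700000 + 3856 ≤ (e.reg .rsp).toNat) :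
    0x100000 ≤ mapOf v.mem (fOf e) (mOf e) ∧ mapOf v.mem (fOf e) (mOf e) + 56 ≤ 0xC00000 ∧
      (mapOf v.mem (fOf e) (mOf e) + 56 ≤ 0x700000 ∨ 0x800000 ≤ mapOf v.mem (fOf e) (mOf e)) := by
  have hv := h.inv.fb.vorbis
  have hm := mode_lt_now h hroom
  have hargs := h.pre.2.2
  have hlt := hv.mode.mapping_lt hm
  have hblk := hv.mapping.MP1_block
  have hin := h.inv.ok.inside _ hblk
  have hoff := h.inv.offStack _ hblk
  have hmp1 := hv.mapping.MP1
  unfold mapOf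
  rw [hargs.m_eq]
  simp only [vacc, voff] at hlt hblk hin hoff hmp1 ⊢
  omega

/-- **Where the `chan` block of the mapping record is** (MP2: `3·C` bytes): in the data space, off the stack region. -/
theorem chan_where (h : Frame u₀ others frames len Ar stored room mode ysz e ret v)
    (hroom : 0x700000 + 3856 ≤ (e.reg .rsp).toNat) :
    0x100000 ≤ Mapping.chan v.mem (mapOf v.mem (fOf e) (mOf e)) ∧
      Mapping.chan v.mem (mapOf v.mem (fOf e) (mOf e)) + 3 * nchan v.mem (fOf e) ≤ 0xC00000 ∧
      (Mapping.chan v.mem (mapOf v.mem (fOf e) (mOf e)) + 3 * nchan v.mem (fOf e) ≤ 0x700000 ∨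
        0x800000 ≤ Mapping.chan v.mem (mapOf v.mem (fOf e) (mOf e))) := by
  have hblk := (map_ok h hroom).MP2
  have hin := h.inv.ok.inside _ hblk
  have hoff := h.inv.offStack _ hblk
  simp only [voff] at hblk hin hoff
  omega

/-- **A check site in the mapping record** (`map + {0, 8}`: `coupling_steps`, `chan`): MP1. -/
theorem site_map (h : Frame u₀ others frames len Ar stored room mode ysz e ret v)
    (hroom : 0x700000 + 3856 ≤ (e.reg .rsp).toNat) (off n : Nat) (hoff : off + n ≤ 56) (hn : 1 ≤ n) :
    Site (LiveSet others (framesIn frames e)) (mapOf v.mem (fOf e) (mOf e) + off) n := by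
  have hv := h.inv.fb.vorbis
  have hm := mode_lt_now h hroom
  have hargs := h.pre.2.2
  refine hv.mapping.site_record h.inv.live (hv.mode.mapping_lt hm) off n (by simp only [voff]; omega) hn ?_
  unfold mapOf
  rw [hargs.m_eq]

/-- **A check site in `map->chan[k]`**, `k < coupling_steps` (≤ C by MP4): MP2. -/
theorem site_chan8 (h : Frame u₀ others frames len Ar stored room mode ysz e ret v)
    (hroom : 0x700000 + 3856 ≤ (e.reg .rsp).toNat) {k : Nat}
    (hk : k < Mapping.coupling_steps v.mem (mapOf v.mem (fOf e) (mOf e))) (off : Nat) (hoff : off + 1 ≤ 3) {a : Nat}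
    (ha : a = Mapping.chan v.mem (mapOf v.mem (fOf e) (mOf e)) + 3 * k + off) :
    Site (LiveSet others (framesIn frames e)) a 1 := by
  refine (map_ok h hroom).site_chan_step h.inv.live hk off 1 (by simp only [voff]; omega) (Nat.le_refl _) ?_
  rw [ha]
  simp only [vacc, voff]

/-- MP4, first half, with HD1: `coupling_steps ≤ C ≤ 16`. -/
theorem steps_le (h : Frame u₀ others frames len Ar stored room mode ysz e ret v)
    (hroom : 0x700000 + 3856 ≤ (e.reg .rsp).toNat) :
    Mapping.coupling_steps v.mem (mapOf v.mem (fOf e) (mOf e)) ≤ nchan v.mem (fOf e) ∧ nchan v.mem (fOf e) ≤ 16 := by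
  have h4 := (map_ok h hroom).MP4_steps
  have h1 := (Real.VorbisOK.config h.inv.fb.vorbis).header.HD1.2
  rw [nchan_def]
  omega

/-- The windows of the segment inside the function's stack area, relative to the entry stack pointer `sp`: the stack of the
callees (`memcpy`'s 80 bytes and the return addresses: `[sp − 3088, sp − 3000)`), `zero_channel` (`[sp − 2360, sp − 1336)`),
`really_zero_channel` (`[sp − 1208, sp − 184)`). -/
def segWins (sp : Nat) : List Span :=
  [⟨sp - 3088, sp - 3000⟩, ⟨sp - 2360, sp - 1336⟩, ⟨sp - 1208, sp - 184⟩]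

/-- **A read off the three windows of the segment is the read of before.** -/
theorem read_kept {m m' : Mem} {sp : Nat} (hs : Mem.SameExcept (segWins sp) m m') (a : Word) (k : Nat)
    (h3 : a.toNat + k < 2 ^ 64)
    (hd : a.toNat + k ≤ sp - 3088 ∨ (sp - 3000 ≤ a.toNat ∧ a.toNat + k ≤ sp - 2360) ∨
      (sp - 1336 ≤ a.toNat ∧ a.toNat + k ≤ sp - 1208) ∨ sp - 184 ≤ a.toNat) :
    m'.readLE a k = m.readLE a k := by
  apply hs.readLE a k h3
  intro w hw
  simp only [segWins, List.mem_cons, List.mem_nil_iff, or_false] at hw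
  rcases hw with rfl | rfl | rfl <;> simp only [] <;> omega

/-- **No allocated block of the run is touched by a store into the three windows**: they lie in the stack region. -/
theorem wins_allKept (h : Frame u₀ others frames len Ar stored room mode ysz e ret v)
    (hroom : 0x700000 + 3856 ≤ (e.reg .rsp).toNat) (htop : (e.reg .rsp).toNat + 8 ≤ 0x800000) {m' : Mem}
    (hs : Mem.SameExcept (segWins (e.reg .rsp).toNat) v.mem m') : AllKept (RunBlk Ar len) v.mem m' := by
  apply AllKept.of_sameExcept h.inv.ok hs
  intro B hB w hw
  have hoff := h.inv.offStack B hB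
  simp only [segWins, List.mem_cons, List.mem_nil_iff, or_false] at hw
  rcases hw with rfl | rfl | rfl <;> simp only [] <;> omega

/-- **THE EXIT ASSERTION FROM THE ENTRY ASSERTION** when only the three windows of the segment (all inside the function's own
stack area, off every spill slot) were written and no shadow byte: `Frame` and `Stable` are carried (`DecodeInv.carry`, the
slots by `read_kept`), `r15 = map` and `r13 = SB` are what the segment's first two instructions leave. -/
theorem at9_of (hat : At8 u₀ others frames len Ar stored room mode ysz e ret v)
    (hroom : 0x700000 + 3856 ≤ (e.reg .rsp).toNat) (htop : (e.reg .rsp).toNat + 8 ≤ 0x800000)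
    {w : State} (hs : Mem.SameExcept (segWins (e.reg .rsp).toNat) v.mem w.mem) (hun : ShadowUntouched v.mem w.mem)
    (hrip : w.rip = Vorbis.L.vorbis_decode_packet_rest.cut25) (hrsp : w.reg .rsp = e.reg .rsp - 3000)
    (hcode : Vorbis.CodeOK u₀ w.mem) (habi : abiInv w)
    (hr15 : w.reg .r15 = v.reg .r13) (hr13 : w.reg .r13 = UInt64.ofNat (sbOf e)) :
    At9 u₀ others frames len Ar stored room mode ysz e ret w := by
  have hf := hat.toStable.toFrame
  have hk := wins_allKept hf hroom htop hs
  have hobk := hk _ hat.inv.ob1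
  have hm := mode_lt_now hf hroom
  have h64 := hat.inv.fb.vorbis.mode.mode_index_lt hm
  have hmeq := hat.pre.2.2.m_eq
  -- the fields of `*f` the assertion reads: `*f` is an allocated block, off the stack
  have eflag : Mode.blockflag w.mem (mOf e) = Mode.blockflag v.mem (mOf e) := by
    rw [hmeq]
    simp only [vacc, voff]
    exact hobk.u8 _ (by simp only [vblock, voff]; omega) (by simp only [vblock, voff]; omega)
  have emap : Mode.mapping w.mem (mOf e) = Mode.mapping v.mem (mOf e) := by
    rw [hmeq]
    simp only [vacc, voff]
    exact hobk.u8 _ (by simp only [vblock, voff]; omega) (by simp only [vblock, voff]; omega)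
  have hn : nOf w.mem (fOf e) (mOf e) = nOf v.mem (fOf e) (mOf e) := by
    unfold nOf
    rw [eflag]
    apply bsize_congr
    · simp only [vacc, voff]
      exact hobk.i32 _ (by simp only [vblock, voff]; omega) (by simp only [vblock, voff]; omega)
    · simp only [vacc, voff]
      exact hobk.i32 _ (by simp only [vblock, voff]; omega) (by simp only [vblock, voff]; omega)
  have hmap : mapOf w.mem (fOf e) (mOf e) = mapOf v.mem (fOf e) (mOf e) := by
    unfold mapOf
    rw [emap]
    simp only [vacc, voff]
    rw [hobk.u64 (fOf e + 472) (by simp only [vblock, voff]; omega) (by simp only [vblock, voff]; omega)]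
  -- `p_left` points into a caller's frame: above the function's stack area
  have hleft := hat.pre.2.2.left_obj
  have habove := hleft.1.above hat.pre.1.inv
  have hl2 := hleft.2
  have eleft : w.mem.i32 (pLeftOf e) = v.mem.i32 (pLeftOf e) := by
    refine (hs.eqOn (pLeftOf e) (pLeftOf e + 4) ?_).i32 _ (Nat.le_refl _) (Nat.le_refl _) (by omega)
    intro x hx
    simp only [segWins, List.mem_cons, List.mem_nil_iff, or_false] at hx
    rcases hx with rfl | rfl | rfl <;> simp only [] <;> omega
  have sp0 : (e.reg .rsp - 3000 : Word).toNat = (e.reg .rsp).toNat - 3000 := by u_omega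
  refine
    { entry := hat.entry
      pre := hat.pre
      rsp := hrsp
      code := hcode
      abi := habi
      same := ?same
      ra := ?ra
      s_r15 := ?s15
      s_r14 := ?s14
      s_r13 := ?s13
      s_r12 := ?s12
      s_rbp := ?sbp
      s_rbx := ?sbx
      shadow := hat.shadow.untouched hun
      inv := hat.inv.carry hat.shadow hk (hat.shadow.untouched hun)
      slot_f := ?sf
      slot_len := ?slen
      slot_m := ?sm
      slot_ls := ?sls
      slot_rs := ?srs
      slot_n := ?sn
      slot_n2 := ?sn2
      slot_sb := ?ssb
      arg_re := ?are
      arg_left := ?aleft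
      left_val := ?lval
      rip := hrip
      r15 := ?r15
      r13 := ?r13 }
  case same =>
    refine hat.same.step_same hs ?_
    intro x hx a h1 h2
    apply covered_footprint
    left
    simp only [segWins, List.mem_cons, List.mem_nil_iff, or_false] at hx
    rcases hx with rfl | rfl | rfl <;> simp only [] at h1 h2 <;> omega
  case ra =>
    rw [read_kept hs _ 8 (by u_omega) (by u_omega)]
    exact hat.ra
  case s15 =>
    rw [read_kept hs _ 8 (by u_omega) (by u_omega)]
    exact hat.s_r15
  case s14 =>
    rw [read_kept hs _ 8 (by u_omega) (by u_omega)]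
    exact hat.s_r14
  case s13 =>
    rw [read_kept hs _ 8 (by u_omega) (by u_omega)]
    exact hat.s_r13
  case s12 =>
    rw [read_kept hs _ 8 (by u_omega) (by u_omega)]
    exact hat.s_r12
  case sbp =>
    rw [read_kept hs _ 8 (by u_omega) (by u_omega)]
    exact hat.s_rbp
  case sbx =>
    rw [read_kept hs _ 8 (by u_omega) (by u_omega)]
    exact hat.s_rbx
  case sf =>
    show w.mem.readLE (e.reg .rsp - 3000 + 0x40) 8 = _
    rw [read_kept hs _ 8 (by u_omega) (by u_omega)]
    exact hat.slot_f
  case slen =>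
    show w.mem.readLE (e.reg .rsp - 3000 + 0x68) 8 = _
    rw [read_kept hs _ 8 (by u_omega) (by u_omega)]
    exact hat.slot_len
  case sm =>
    show w.mem.readLE (e.reg .rsp - 3000 + 0x70) 8 = _
    rw [read_kept hs _ 8 (by u_omega) (by u_omega)]
    exact hat.slot_m
  case sls =>
    show sint32 (w.mem.readLE (e.reg .rsp - 3000 + 0x78) 4) = _
    rw [read_kept hs _ 4 (by u_omega) (by u_omega)]
    exact hat.slot_ls
  case srs =>
    show sint32 (w.mem.readLE (e.reg .rsp - 3000 + 0x7c) 4) = _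
    rw [read_kept hs _ 4 (by u_omega) (by u_omega)]
    exact hat.slot_rs
  case sn =>
    show w.mem.readLE (e.reg .rsp - 3000 + 0x50) 4 = _
    rw [read_kept hs _ 4 (by u_omega) (by u_omega), hn]
    exact hat.slot_n
  case sn2 =>
    show w.mem.readLE (e.reg .rsp - 3000 + 0x3c) 4 = _
    rw [read_kept hs _ 4 (by u_omega) (by u_omega), hn]
    exact hat.slot_n2
  case ssb =>
    show w.mem.readLE (e.reg .rsp - 3000 + 0x60) 8 = _
    rw [read_kept hs _ 8 (by u_omega) (by u_omega)]
    exact hat.slot_sb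
  case are =>
    rw [read_kept hs _ 4 (by u_omega) (by u_omega)]
    exact hat.arg_re
  case aleft =>
    rw [read_kept hs _ 8 (by u_omega) (by u_omega)]
    exact hat.arg_left
  case lval =>
    rw [eleft]
    exact hat.left_val
  case r15 =>
    rw [hr15, hmap]
    exact hat.r13
  case r13 =>
    rw [hr13, UInt64.toNat_ofNat']
    apply Nat.mod_eq_of_lt
    unfold sbOf
    omega

/-! ### The walker's bit-level forms as numbers -/

/-- `movsxd rax, r12d` of a small counter is the counter. -/
theorem sext_ofNat (i : Nat) (h : i < 2 ^ 31) :
    Word.ofBV (BitVec.signExtend 64 (Word.part .w32 (UInt64.ofNat i))) = UInt64.ofNat i := by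
  apply UInt64.toNat_inj.mp
  have h1 : (Word.part .w32 (UInt64.ofNat i)).toNat = i := by
    rw [Vorbis.toNat_part32, UInt64.toNat_ofNat']
    omega
  rw [toNat_sext32 _ (by omega), h1, UInt64.toNat_ofNat']
  omega

/-- `movzx r32, BYTE PTR [m]`: the loaded byte, below 256 whatever was read. -/
theorem zx8 (x : Nat) : Word.ofBV (BitVec.zeroExtend 32 (BitVec.ofNat 8 x)) = UInt64.ofNat (x % 256) := by
  apply UInt64.toNat_inj.mp
  rw [Vorbis.toNat_ofBV32, UInt64.toNat_ofNat']
  simp only [BitVec.zeroExtend, BitVec.toNat_setWidth, BitVec.toNat_ofNat]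
  omega

/-- `cmp eax, r12d ; jle` with `eax` a zero-extended `uint16` and `r12d` a small counter: the signed comparison is the one of
the numbers. -/
theorem br_iff (cs i : Nat) (hcs : cs < 2 ^ 16) (hi : i < 2 ^ 31) :
    ((BitVec.zeroExtend 32 (BitVec.ofNat 16 cs)).toInt ≤ (Word.part .w32 (UInt64.ofNat i)).toInt) ↔ cs ≤ i := by
  have h1 : (Word.part .w32 (UInt64.ofNat i)).toNat = i := by
    rw [Vorbis.toNat_part32, UInt64.toNat_ofNat']
    omega
  have h2 : (BitVec.zeroExtend 32 (BitVec.ofNat 16 cs)).toNat = cs := by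
    simp only [BitVec.zeroExtend, BitVec.toNat_setWidth, BitVec.toNat_ofNat]
    omega
  rw [toInt_of_lt _ (by omega), toInt_of_lt _ (by omega), h1, h2]
  omega

/-- `add r12d, 1` on a small counter. -/
theorem r12_succ (i : Nat) (h : i + 1 < 2 ^ 32) :
    Word.ofBV (Word.part .w32 (UInt64.ofNat i) + 1#32) = UInt64.ofNat (i + 1) := by
  apply UInt64.toNat_inj.mp
  have h1 : (Word.part .w32 (UInt64.ofNat i)).toNat = i := by
    rw [Vorbis.toNat_part32, UInt64.toNat_ofNat']
    omega
  have e1 : (1#32).toNat = 1 := by decide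
  rw [Vorbis.toNat_ofBV32, BitVec.toNat_add, h1, e1, UInt64.toNat_ofNat']
  omega

/-! ### The check sites -/

/-- A 4-byte check of `zero_channel[x]`, `x` a byte: inside the 1024-byte frame object for every `x`. -/
theorem chk_zc (hat : At8 u₀ others frames len Ar stored room mode ysz e ret v)
    (hroom : 0x700000 + 3856 ≤ (e.reg .rsp).toNat) {m' : Mem} (hun : ShadowUntouched v.mem m') (b : Word)
    (h1 : (e.reg .rsp).toNat - 2360 ≤ b.toNat) (h2 : b.toNat + 4 ≤ (e.reg .rsp).toNat - 1336) : AccSmall 4 m' b := by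
  refine check_small hat.shadow hun (zc_obj others frames e) (by decide) ?_ ?_
  · simp only []
    omega
  · simp only []
    omega

/-- A check in the mapping record. -/
theorem chk_map (hat : At8 u₀ others frames len Ar stored room mode ysz e ret v)
    (hroom : 0x700000 + 3856 ≤ (e.reg .rsp).toNat) {m' : Mem} (hun : ShadowUntouched v.mem m') (b : Word) (off n : Nat)
    (hoff : off + n ≤ 56) (hn : 1 ≤ n) (hb : b.toNat = mapOf v.mem (fOf e) (mOf e) + off) : AccSmall n m' b :=
  check_site hat.shadow hun (site_map hat.toStable.toFrame hroom off n hoff hn) hb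

/-- A 1-byte check in `map->chan[k]`, `k < coupling_steps`. -/
theorem chk_chan (hat : At8 u₀ others frames len Ar stored room mode ysz e ret v)
    (hroom : 0x700000 + 3856 ≤ (e.reg .rsp).toNat) {m' : Mem} (hun : ShadowUntouched v.mem m') (b : Word) {k : Nat}
    (hk : k < Mapping.coupling_steps v.mem (mapOf v.mem (fOf e) (mOf e))) (off : Nat) (hoff : off + 1 ≤ 3)
    (hb : b.toNat = Mapping.chan v.mem (mapOf v.mem (fOf e) (mOf e)) + 3 * k + off) : AccSmall 1 m' b :=
  check_site hat.shadow hun (site_chan8 hat.toStable.toFrame hroom hk off hoff rfl) hb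

end Vorbis.Spec.vorbis_decode_packet_rest_8
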